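-- pv_equiv track=rewrite | github.com/rupinrd3/bespoke-decision-tree-utility | models/split_worker.py | _guess_positive_class
-- ===== SOURCE A (Python) =====
-- from typing import Any, Dict, Iterable, List, Optional, Sequence, Tuple
--
-- def _guess_positive_class(classes: Sequence[Any]) -> Any:
--     if len(classes) == 2:
--         preferred = [
--             1,
--             True,
--             "1",
--             "True",
--             "true",
--             "Yes",
--             "yes",
--             "Y",
--             "y",
--             "positive",
--             "Positive",
--         ]
--         for token in preferred:
--             for cls in classes:
--                 if str(cls).lower() == str(token).lower():
--                     return cls
--         return classes[1]
--     try: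
--         return sorted(classes)[-1]
--     except TypeError:
--         return classes[-1]
-- ===== SOURCE B (Python) =====
-- def _guess_positive_class(classes):
--     if len(classes) == 2:
--         # distinct lowered preference tokens, in preference order
--         pref = ["1", "true", "yes", "y", "positive"]
--         sentinel = len(pref)
--
--         def priority(cls):
--             s = str(cls).lower()
--             return pref.index(s) if s in pref else sentinel
--
--         p0, p1 = priority(classes[0]), priority(classes[1])
--         if p0 == sentinel and p1 == sentinel:
--             return classes[1]
--         return classes[0] if p0 <= p1 else classes[1]
--     return sorted(classes)[-1]
-- ===== Notes on version B (the rewrite author's own statement) =====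
-- stated objective: simpler
-- what changed: The two-class branch's nested token-outer/class-inner scan over an 11-token list is replaced by computing one priority per class (first index of its lowercased form in the 5 distinct lowered tokens, sentinel if absent) and selecting the class with the smaller (priority, position); the len!=2 branch (sorted(classes)[-1]) is kept.
-- outside the precondition, e.g. on _guess_positive_class([]): A raises IndexError, B raises IndexError
import Mathlib
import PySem

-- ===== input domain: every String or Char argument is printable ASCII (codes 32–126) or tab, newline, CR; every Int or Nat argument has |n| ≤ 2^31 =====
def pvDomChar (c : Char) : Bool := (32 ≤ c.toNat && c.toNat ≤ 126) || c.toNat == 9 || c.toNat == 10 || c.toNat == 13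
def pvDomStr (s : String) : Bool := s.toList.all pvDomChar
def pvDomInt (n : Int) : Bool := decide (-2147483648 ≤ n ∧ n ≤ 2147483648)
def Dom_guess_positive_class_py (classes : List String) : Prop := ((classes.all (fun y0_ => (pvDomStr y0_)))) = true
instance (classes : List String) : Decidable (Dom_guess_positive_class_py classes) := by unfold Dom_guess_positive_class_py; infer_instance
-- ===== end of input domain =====

-- B replaces the two-class nested token-outer/class-inner scan by one priority per class plus a
-- minimum selection (objective: simpler); the len != 2 branch is kept. Return values only; no mutation.

-- ===== PORT A =====
-- inner 'for cls in classes: if str(cls).lower() == str(token).lower(): return cls' is find?;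
-- outer 'for token in preferred' is this recursion over the token list
def pvScanTok (classes : List String) : List String → Option String
  | [] => none
  | t :: ts =>
    match classes.find? (fun c => PySem.Str.lower c == PySem.Str.lower t) with
    | some c => some c
    | none => pvScanTok classes ts

def guess_positive_class_py (classes : List String) : String :=
  if classes.length = 2 then
    -- the preferred list, each element already through str(): str(1) = "1", str(True) = "True"
    match pvScanTok classes ["1", "True", "1", "True", "true", "Yes", "yes", "Y", "y", "positive", "Positive"] with
    | some c => c
    | none => PySem.List.pyGetD classes 1 ""    -- classes[1], in range since length = 2
  else
    -- sorted(classes)[-1]; on List String never TypeError; classes = [] (IndexError) is excluded by Pre_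
    PySem.List.pyGetD (PySem.List.sorted classes (fun x => x) false) (-1) ""

-- ===== PORT B =====
-- the distinct lowered preference tokens, in preference order
def pvPref : List String := ["1", "true", "yes", "y", "positive"]

-- priority(cls): pref.index(str(cls).lower()) if present, else the sentinel 5 = len(pref)
def pvPri (c : String) : Nat := (PySem.List.index? pvPref (PySem.Str.lower c)).getD 5

def guess_positive_class_py_alt (classes : List String) : String :=
  if classes.length = 2 then
    let a := PySem.List.pyGetD classes 0 ""
    let b := PySem.List.pyGetD classes 1 ""
    let p0 := pvPri a
    let p1 := pvPri b
    if p0 = 5 ∧ p1 = 5 then b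
    else if p0 ≤ p1 then a else b
  else
    PySem.List.pyGetD (PySem.List.sorted classes (fun x => x) false) (-1) ""

-- ===== PRECONDITION & SPEC =====
-- Pre_ excludes only the empty list, on which A raises IndexError (sorted([])[-1]).
def Pre_guess_positive_class_py (classes : List String) : Prop := classes ≠ []
instance (classes : List String) : Decidable (Pre_guess_positive_class_py classes) := by unfold Pre_guess_positive_class_py; infer_instance
def pvWitness_guess_positive_class_py : List String := ["no", "Yes"]

def Spec_guess_positive_class_py (classes : List String) (out : String) : Prop := out = guess_positive_class_py_alt classes
instance (classes : List String) (out : String) : Decidable (Spec_guess_positive_class_py classes out) := by unfold Spec_guess_positive_class_py; infer_instance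

-- ===== CLAIM (what is proved, stated in full; the proofs are below) =====
def Claim_equal_guess_positive_class_py : Prop := ∀ (classes : List String), Dom_guess_positive_class_py classes → Pre_guess_positive_class_py classes → Spec_guess_positive_class_py classes (guess_positive_class_py classes)

-- ===== LEMMAS AND PROOFS =====

-- the two-class branch: A's scan and B's priority selection agree on any pair of strings
lemma pv_two_case (a b : String) :
    guess_positive_class_py [a, b] = guess_positive_class_py_alt [a, b] := by
  show (match pvScanTok [a, b] ["1", "True", "1", "True", "true", "Yes", "yes", "Y", "y", "positive", "Positive"] with
        | some c => c
        | none => b) =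
       (if pvPri a = 5 ∧ pvPri b = 5 then b else if pvPri a ≤ pvPri b then a else b)
  have l1 : PySem.Str.lower "True" = "true" := by decide
  have l2 : PySem.Str.lower "Yes" = "yes" := by decide
  have l3 : PySem.Str.lower "Y" = "y" := by decide
  have l4 : PySem.Str.lower "Positive" = "positive" := by decide
  have l5 : PySem.Str.lower "1" = "1" := by decide
  have l6 : PySem.Str.lower "true" = "true" := by decide
  have l7 : PySem.Str.lower "yes" = "yes" := by decide
  have l8 : PySem.Str.lower "y" = "y" := by decide
  have l9 : PySem.Str.lower "positive" = "positive" := by decide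
  simp only [pvScanTok, pvPri, pvPref, List.find?, l1, l2, l3, l4, l5, l6, l7, l8, l9,
    PySem.List.index?_eq_idxOf?, List.idxOf?, List.findIdx?]
  by_cases e1 : PySem.Str.lower a = "1"
  · simp [List.findIdx?.go, *]
  have e1b : (PySem.Str.lower a == "1") = false := beq_eq_false_iff_ne.mpr e1
  have e1b' : ("1" == PySem.Str.lower a) = false := beq_eq_false_iff_ne.mpr (fun h => e1 h.symm)
  by_cases f1 : PySem.Str.lower b = "1"
  · simp [List.findIdx?.go, *]; try (intro h; split_ifs at h <;> simp at h)
  have f1b : (PySem.Str.lower b == "1") = false := beq_eq_false_iff_ne.mpr f1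
  have f1b' : ("1" == PySem.Str.lower b) = false := beq_eq_false_iff_ne.mpr (fun h => f1 h.symm)
  by_cases e2 : PySem.Str.lower a = "true"
  · simp [List.findIdx?.go, *]; try (intro h; split_ifs at h <;> simp at h)
  have e2b : (PySem.Str.lower a == "true") = false := beq_eq_false_iff_ne.mpr e2
  have e2b' : ("true" == PySem.Str.lower a) = false := beq_eq_false_iff_ne.mpr (fun h => e2 h.symm)
  by_cases f2 : PySem.Str.lower b = "true"
  · simp [List.findIdx?.go, *]; try (intro h; split_ifs at h <;> simp at h)
  have f2b : (PySem.Str.lower b == "true") = false := beq_eq_false_iff_ne.mpr f2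
  have f2b' : ("true" == PySem.Str.lower b) = false := beq_eq_false_iff_ne.mpr (fun h => f2 h.symm)
  by_cases e3 : PySem.Str.lower a = "yes"
  · simp [List.findIdx?.go, *]; try (intro h; split_ifs at h <;> simp at h)
  have e3b : (PySem.Str.lower a == "yes") = false := beq_eq_false_iff_ne.mpr e3
  have e3b' : ("yes" == PySem.Str.lower a) = false := beq_eq_false_iff_ne.mpr (fun h => e3 h.symm)
  by_cases f3 : PySem.Str.lower b = "yes"
  · simp [List.findIdx?.go, *]; try (intro h; split_ifs at h <;> simp at h)
  have f3b : (PySem.Str.lower b == "yes") = false := beq_eq_false_iff_ne.mpr f3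
  have f3b' : ("yes" == PySem.Str.lower b) = false := beq_eq_false_iff_ne.mpr (fun h => f3 h.symm)
  by_cases e4 : PySem.Str.lower a = "y"
  · simp [List.findIdx?.go, *]; try (intro h; split_ifs at h <;> simp at h)
  have e4b : (PySem.Str.lower a == "y") = false := beq_eq_false_iff_ne.mpr e4
  have e4b' : ("y" == PySem.Str.lower a) = false := beq_eq_false_iff_ne.mpr (fun h => e4 h.symm)
  by_cases f4 : PySem.Str.lower b = "y"
  · simp [List.findIdx?.go, *]; try (intro h; split_ifs at h <;> simp at h)
  have f4b : (PySem.Str.lower b == "y") = false := beq_eq_false_iff_ne.mpr f4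
  have f4b' : ("y" == PySem.Str.lower b) = false := beq_eq_false_iff_ne.mpr (fun h => f4 h.symm)
  by_cases e5 : PySem.Str.lower a = "positive"
  · simp [List.findIdx?.go, *]; try (intro h; split_ifs at h <;> simp at h)
  have e5b : (PySem.Str.lower a == "positive") = false := beq_eq_false_iff_ne.mpr e5
  have e5b' : ("positive" == PySem.Str.lower a) = false := beq_eq_false_iff_ne.mpr (fun h => e5 h.symm)
  by_cases f5 : PySem.Str.lower b = "positive"
  · simp [List.findIdx?.go, *]
  have f5b : (PySem.Str.lower b == "positive") = false := beq_eq_false_iff_ne.mpr f5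
  have f5b' : ("positive" == PySem.Str.lower b) = false := beq_eq_false_iff_ne.mpr (fun h => f5 h.symm)
  simp [List.findIdx?.go, *]

-- ===== VERDICT (by name: the statement is the Claim_ definition above) =====
theorem guess_positive_class_py_spec : Claim_equal_guess_positive_class_py := by
  intro classes _ hpre
  unfold Spec_guess_positive_class_py
  match classes with
  | [] => exact absurd rfl hpre
  | [a] => rfl
  | [a, b] => exact pv_two_case a b
  | a :: b :: c :: t => simp [guess_positive_class_py, guess_positive_class_py_alt]
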